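-- pv_equiv track=rewrite | github.com/discordwell/ClawedCommand | tools/asset_pipeline/scripts/regrid_sheet.py | merge_nearby_blobs
-- ===== SOURCE A (Python) =====
-- def merge_nearby_blobs(blobs: list[tuple[int, int, int, int]],
--                        max_gap: int = 8) -> list[tuple[int, int, int, int]]:
--     """Merge blobs that are close together (e.g. disconnected parts of same sprite)."""
--     if not blobs:
--         return blobs
--
--     merged = [blobs[0]]
--     for b in blobs[1:]:
--         prev = merged[-1]
--         # Check if this blob's left edge is close to previous blob's right edge
--         gap = b[0] - prev[2]
--         if gap < max_gap:
--             # Merge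
--             merged[-1] = (
--                 min(prev[0], b[0]),
--                 min(prev[1], b[1]),
--                 max(prev[2], b[2]),
--                 max(prev[3], b[3]),
--             )
--         else:
--             merged.append(b)
--
--     return merged
-- ===== SOURCE B (Python) =====
-- def merge_nearby_blobs(blobs: list[tuple[int, int, int, int]],
--                        max_gap: int = 8) -> list[tuple[int, int, int, int]]:
--     """Merge blobs that are close together (e.g. disconnected parts of same sprite)."""
--     if not blobs:
--         return blobs
--     # First pass: partition into groups, tracking only the running max right edge.
--     groups = [[blobs[0]]]
--     right = blobs[0][2]
--     for b in blobs[1:]: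
--         if b[0] - right < max_gap:
--             groups[-1].append(b)
--             right = max(right, b[2])
--         else:
--             groups.append([b])
--             right = b[2]
--     # Second pass: aggregate each group into a bounding box.
--     return [(min(x[0] for x in g),
--              min(x[1] for x in g),
--              max(x[2] for x in g),
--              max(x[3] for x in g)) for g in groups]
-- ===== Notes on version B (the rewrite author's own statement) =====
-- stated objective: alternative
-- what changed: Replaces A's single pass that rewrites merged[-1] with a two-phase decomposition: a grouping pass that only tracks the running max right edge, then a map computing each group's bounding box via min/max over the whole group.
import Mathlib
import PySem

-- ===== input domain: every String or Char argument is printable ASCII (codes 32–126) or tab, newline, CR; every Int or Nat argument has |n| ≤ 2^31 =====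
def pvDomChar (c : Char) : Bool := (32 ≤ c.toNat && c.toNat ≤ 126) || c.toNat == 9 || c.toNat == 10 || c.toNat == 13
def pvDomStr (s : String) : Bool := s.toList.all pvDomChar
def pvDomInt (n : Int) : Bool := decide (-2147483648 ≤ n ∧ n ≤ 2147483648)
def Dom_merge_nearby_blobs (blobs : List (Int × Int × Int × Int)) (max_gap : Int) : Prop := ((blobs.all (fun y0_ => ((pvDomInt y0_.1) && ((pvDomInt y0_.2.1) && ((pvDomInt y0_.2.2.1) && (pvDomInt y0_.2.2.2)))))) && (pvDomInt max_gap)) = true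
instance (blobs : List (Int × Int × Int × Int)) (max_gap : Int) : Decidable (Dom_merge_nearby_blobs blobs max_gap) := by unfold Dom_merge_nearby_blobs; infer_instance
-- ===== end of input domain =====

-- B replaces A's in-place rewriting of merged[-1] by a two-phase decomposition (group, then aggregate); objective: alternative.


-- ===== PORT A =====
-- A: one pass keeping the merged list; merged[-1] is read (getLastD on a nonempty list)
-- and replaced in place (dropLast ++ [new]).
def merge_nearby_blobs (blobs : List (Int × Int × Int × Int)) (max_gap : Int) : List (Int × Int × Int × Int) :=
  match blobs with
  | [] => blobs
  | b0 :: rest =>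
    rest.foldl (fun merged b =>
      let prev := merged.getLastD (0, 0, 0, 0)
      let gap := b.1 - prev.2.2.1
      if gap < max_gap then
        merged.dropLast ++ [(min prev.1 b.1, min prev.2.1 b.2.1,
                             max prev.2.2.1 b.2.2.1, max prev.2.2.2 b.2.2.2)]
      else
        merged ++ [b]) [b0]

-- ===== PORT B =====
-- B helper: the bounding box of one (nonempty) group: min/max of each component
-- (Python's min/max over a nonempty generator).
def pvAgg (g : List (Int × Int × Int × Int)) : Int × Int × Int × Int :=
  match g with
  | [] => (0, 0, 0, 0)
  | h :: t =>
    (t.foldl (fun m x => min m x.1) h.1,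
     t.foldl (fun m x => min m x.2.1) h.2.1,
     t.foldl (fun m x => max m x.2.2.1) h.2.2.1,
     t.foldl (fun m x => max m x.2.2.2) h.2.2.2)

def merge_nearby_blobs_alt (blobs : List (Int × Int × Int × Int)) (max_gap : Int) : List (Int × Int × Int × Int) :=
  match blobs with
  | [] => blobs
  | b0 :: rest =>
    let st := rest.foldl (fun (s : List (List (Int × Int × Int × Int)) × Int) b =>
      if b.1 - s.2 < max_gap then
        (s.1.dropLast ++ [s.1.getLastD [] ++ [b]], max s.2 b.2.2.1)
      else
        (s.1 ++ [[b]], b.2.2.1)) ([[b0]], b0.2.2.1)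
    st.1.map pvAgg

-- ===== PRECONDITION & SPEC =====
def Spec_merge_nearby_blobs (blobs : List (Int × Int × Int × Int)) (max_gap : Int) (out : List (Int × Int × Int × Int)) : Prop := out = merge_nearby_blobs_alt blobs max_gap
instance (blobs : List (Int × Int × Int × Int)) (max_gap : Int) (out : List (Int × Int × Int × Int)) : Decidable (Spec_merge_nearby_blobs blobs max_gap out) := by unfold Spec_merge_nearby_blobs; infer_instance

-- ===== CLAIM (what is proved, stated in full; the proofs are below) =====
def Claim_equal_merge_nearby_blobs : Prop := ∀ (blobs : List (Int × Int × Int × Int)) (max_gap : Int), Dom_merge_nearby_blobs blobs max_gap → Spec_merge_nearby_blobs blobs max_gap (merge_nearby_blobs blobs max_gap)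

-- ===== LEMMAS AND PROOFS =====

theorem pvAgg_concat (h : Int × Int × Int × Int) (t : List (Int × Int × Int × Int))
    (b : Int × Int × Int × Int) :
    pvAgg (h :: (t ++ [b])) =
      (min (pvAgg (h :: t)).1 b.1, min (pvAgg (h :: t)).2.1 b.2.1,
       max (pvAgg (h :: t)).2.2.1 b.2.2.1, max (pvAgg (h :: t)).2.2.2 b.2.2.2) := by
  simp [pvAgg, List.foldl_append]

theorem getLastD_map_ne {α β : Type} (f : α → β) (l : List α) (hl : l ≠ []) (d : β) (e : α) :
    (l.map f).getLastD d = f (l.getLastD e) := by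
  induction l with
  | nil => exact absurd rfl hl
  | cons h t ih =>
    cases t with
    | nil => simp
    | cons h' t' => simpa using ih (by simp)

theorem getLastD_concat' {α : Type} (l : List α) (x : α) : ∀ d : α, (l ++ [x]).getLastD d = x := by
  induction l with
  | nil => intro d; rfl
  | cons h t ih => intro d; rw [List.cons_append, List.getLastD_cons]; exact ih h

theorem getLastD_mem {α : Type} (l : List α) (hl : l ≠ []) (d : α) : l.getLastD d ∈ l := by
  induction l with
  | nil => exact absurd rfl hl
  | cons h t ih =>
    cases t with
    | nil => simp
    | cons h' t' => simpa using Or.inr (ih (by simp))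

theorem pv_main (max_gap : Int) (rest : List (Int × Int × Int × Int))
    (gs : List (List (Int × Int × Int × Int))) (right : Int)
    (hne : gs ≠ []) (hall : ∀ g ∈ gs, g ≠ [])
    (hr : right = (pvAgg (gs.getLastD [])).2.2.1) :
    rest.foldl (fun merged b =>
      let prev := merged.getLastD (0, 0, 0, 0)
      let gap := b.1 - prev.2.2.1
      if gap < max_gap then
        merged.dropLast ++ [(min prev.1 b.1, min prev.2.1 b.2.1,
                             max prev.2.2.1 b.2.2.1, max prev.2.2.2 b.2.2.2)]
      else
        merged ++ [b]) (gs.map pvAgg) =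
    ((rest.foldl (fun (s : List (List (Int × Int × Int × Int)) × Int) b =>
      if b.1 - s.2 < max_gap then
        (s.1.dropLast ++ [s.1.getLastD [] ++ [b]], max s.2 b.2.2.1)
      else
        (s.1 ++ [[b]], b.2.2.1)) (gs, right)).1).map pvAgg := by
  induction rest generalizing gs right with
  | nil => rfl
  | cons b rest ih =>
    have hlast : (gs.map pvAgg).getLastD (0, 0, 0, 0) = pvAgg (gs.getLastD []) :=
      getLastD_map_ne pvAgg gs hne _ _
    have hgm : gs.getLastD [] ∈ gs := getLastD_mem gs hne []
    have hg : gs.getLastD [] ≠ [] := hall _ hgm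
    subst hr
    simp only [List.foldl_cons, hlast]
    by_cases hc : b.1 - (pvAgg (gs.getLastD [])).2.2.1 < max_gap
    · simp only [if_pos hc]
      obtain ⟨h, t, hht⟩ : ∃ h t, gs.getLastD [] = h :: t := by
        cases hx : gs.getLastD [] with
        | nil => exact absurd hx hg
        | cons h t => exact ⟨h, t, rfl⟩
      have hmapstep :
          (gs.map pvAgg).dropLast ++
            [(min (pvAgg (gs.getLastD [])).1 b.1, min (pvAgg (gs.getLastD [])).2.1 b.2.1,
              max (pvAgg (gs.getLastD [])).2.2.1 b.2.2.1, max (pvAgg (gs.getLastD [])).2.2.2 b.2.2.2)]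
          = (gs.dropLast ++ [gs.getLastD [] ++ [b]]).map pvAgg := by
        rw [hht]
        simp [List.map_append, pvAgg_concat]
      rw [hmapstep]
      refine ih (gs.dropLast ++ [gs.getLastD [] ++ [b]]) _ (by simp) ?_ ?_
      · intro g hgmem
        rcases List.mem_append.mp hgmem with h1 | h1
        · exact hall _ (List.dropLast_subset _ h1)
        · simp only [List.mem_singleton] at h1; subst h1; simp
      · rw [getLastD_concat', hht, List.cons_append, pvAgg_concat]
    · simp only [if_neg hc]
      have hb : (gs.map pvAgg) ++ [b] = (gs ++ [[b]]).map pvAgg := by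
        simp [pvAgg]
      rw [hb]
      refine ih (gs ++ [[b]]) _ (by simp) ?_ ?_
      · intro g hgmem
        rcases List.mem_append.mp hgmem with h1 | h1
        · exact hall _ h1
        · simp only [List.mem_singleton] at h1; subst h1; simp
      · rw [getLastD_concat']; simp [pvAgg]

-- ===== VERDICT (by name: the statement is the Claim_ definition above) =====
theorem merge_nearby_blobs_spec : Claim_equal_merge_nearby_blobs := by
  intro blobs max_gap _
  unfold Spec_merge_nearby_blobs merge_nearby_blobs merge_nearby_blobs_alt
  cases blobs with
  | nil => rfl
  | cons b0 rest =>
    simpa [pvAgg] using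
      pv_main max_gap rest [[b0]] b0.2.2.1 (by simp) (by simp) (by simp [pvAgg])
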